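-- pv_equiv track=rewrite | github.com/pypi-data/pypi-mirror-96 | packages/ql-cq/ql_cq-0.38.0-py3-none-any.whl/cq/checkers/pylint.py | _cleanse_packages
-- ===== SOURCE A (Python) =====
-- from typing import IO, List, Optional, Tuple
--
-- def _cleanse_packages(package_list: List[str]) -> List[str]:
-- 	'''
-- 	Remove packages from list, that are childs of each other.
-- 	'''
-- 	modules: List[str] = []
-- 	for module in package_list:
-- 		for added_module in modules:
-- 			# we should not add module that is subpath of already added module
-- 			# except ending with .py (so tests without __init__.py are also included)
-- 			if module.startswith(added_module) and module != added_module and not module.endswith('.py'):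
-- 				break
-- 		else:
-- 			modules.append(module)
-- 	return modules
-- ===== SOURCE B (Python) =====
-- from typing import List
--
-- def _cleanse_packages(package_list: List[str]) -> List[str]:
-- 	'''
-- 	Remove packages from list, that are childs of each other.
-- 	'''
-- 	modules: List[str] = []
-- 	kept = set()
-- 	for module in package_list:
-- 		if module.endswith('.py') or not any(module[:i] in kept for i in range(len(module))):
-- 			modules.append(module)
-- 			kept.add(module)
-- 	return modules
-- ===== Notes on version B (the rewrite author's own statement) =====
-- stated objective: faster
-- what changed: Instead of rescanning the whole kept-module list for a prefix match per input module, B keeps the kept modules in a set and tests each proper prefix of the module for membership, dropping the inner scan over the output list.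
import Mathlib
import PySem

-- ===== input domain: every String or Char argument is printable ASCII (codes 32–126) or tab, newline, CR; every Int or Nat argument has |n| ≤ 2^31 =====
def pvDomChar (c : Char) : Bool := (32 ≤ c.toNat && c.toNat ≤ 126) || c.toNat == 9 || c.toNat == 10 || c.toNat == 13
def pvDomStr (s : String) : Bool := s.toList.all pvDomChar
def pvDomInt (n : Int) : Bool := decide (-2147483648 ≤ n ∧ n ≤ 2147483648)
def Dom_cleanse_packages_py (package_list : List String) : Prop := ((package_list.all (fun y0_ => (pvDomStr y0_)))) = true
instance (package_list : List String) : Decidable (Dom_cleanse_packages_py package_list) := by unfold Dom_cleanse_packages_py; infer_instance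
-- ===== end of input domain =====

-- B replaces A's rescan of the whole kept list per module by membership tests of the
-- module's proper prefixes in a set of kept modules (alternative algorithm, same value).

-- ===== PORT A =====
def cleanse_packages_py (package_list : List String) : List String :=
  package_list.foldl
    (fun modules module =>
      if modules.any (fun added_module =>
          PySem.Str.startswith module added_module && module != added_module
            && !(PySem.Str.endswith module ".py"))
      then modules
      else modules ++ [module])
    []

-- ===== PORT B =====
def cleanse_packages_py_alt (package_list : List String) : List String :=
  (package_list.foldl
    (fun (st : List String × PySem.Set String) module =>
      if PySem.Str.endswith module ".py"
          || !((PySem.List.pyRange 0 (PySem.Str.len module) 1).any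
                (fun i => PySem.Set.contains st.2 (PySem.Str.slice module none (some i))))
      then (st.1 ++ [module], PySem.Set.add st.2 module)
      else st)
    ([], PySem.Set.empty)).1

-- ===== PRECONDITION & SPEC =====
def Spec_cleanse_packages_py (package_list : List String) (out : List String) : Prop := out = cleanse_packages_py_alt package_list
instance (package_list : List String) (out : List String) : Decidable (Spec_cleanse_packages_py package_list out) := by unfold Spec_cleanse_packages_py; infer_instance

-- ===== CLAIM (what is proved, stated in full; the proofs are below) =====
def Claim_equal_cleanse_packages_py : Prop := ∀ (package_list : List String), Dom_cleanse_packages_py package_list → Spec_cleanse_packages_py package_list (cleanse_packages_py package_list)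

-- ===== LEMMAS AND PROOFS =====

lemma pv_toList_inj {s t : String} (h : s.toList = t.toList) : s = t :=
  String.toList_inj.mp h

-- a kept module is a proper prefix of `m` iff some proper prefix slice of `m` is a kept module
lemma pv_prefix_iff (ms : List String) (m : String) :
    (∃ a, a ∈ ms ∧ a.toList <+: m.toList ∧ ¬ m = a) ↔
    (∃ i : Int, (0 ≤ i ∧ i < (m.toList.length : Int)) ∧ PySem.Str.slice m none (some i) ∈ ms) := by
  constructor
  · rintro ⟨a, ha, hpre, hne⟩
    refine ⟨(a.toList.length : Int), ⟨by positivity, ?_⟩, ?_⟩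
    · have hle := hpre.length_le
      have hnee : a.toList.length ≠ m.toList.length := by
        intro he
        exact hne (pv_toList_inj (hpre.eq_of_length he)).symm
      exact_mod_cast lt_of_le_of_ne hle hnee
    · have hsl : (PySem.Str.slice m none (some (a.toList.length : Int))).toList = a.toList := by
        rw [PySem.Str.toList_slice, PySem.Chars.slice_eq_listSlice, PySem.List.slice_to_natCast m.toList a.toList.length]
        exact (List.prefix_iff_eq_take.mp hpre).symm
      rwa [pv_toList_inj hsl]
  · rintro ⟨i, ⟨h0, hlt⟩, hmem⟩
    have hsl : (PySem.Str.slice m none (some i)).toList = m.toList.take i.toNat := by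
      rw [PySem.Str.toList_slice, PySem.Chars.slice_eq_listSlice, PySem.List.slice_to m.toList h0]
    refine ⟨_, hmem, ?_, ?_⟩
    · rw [hsl]; exact List.take_prefix _ _
    · intro he
      have hlen := congrArg (fun s : String => s.toList.length) he.symm
      simp only [hsl, List.length_take] at hlen
      omega

-- A's break-condition is the negation of B's keep-condition, given that the set `kept`
-- holds exactly the members of the output list `ms`
lemma pv_cond (ms : List String) (kept : PySem.Set String) (m : String)
    (h : ∀ s : String, s ∈ kept ↔ s ∈ ms) :
    (ms.any (fun added_module =>
        PySem.Str.startswith m added_module && m != added_module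
          && !(PySem.Str.endswith m ".py")))
    = !(PySem.Str.endswith m ".py"
        || !((PySem.List.pyRange 0 (PySem.Str.len m) 1).any
              (fun i => PySem.Set.contains kept (PySem.Str.slice m none (some i))))) := by
  rw [Bool.eq_iff_iff]
  simp only [List.any_eq_true, Bool.and_eq_true, Bool.not_eq_true', Bool.or_eq_false_iff,
    Bool.not_eq_false', bne_iff_ne, ne_eq, PySem.Str.startswith_eq, PySem.Chars.startswith_iff,
    PySem.List.mem_pyRange_one, PySem.Set.contains, List.contains_iff_mem, h,
    PySem.Str.len_eq]
  constructor
  · rintro ⟨a, ha, ⟨hpre, hne⟩, hpy⟩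
    exact ⟨hpy, (pv_prefix_iff ms m).mp ⟨a, ha, hpre, hne⟩⟩
  · rintro ⟨hpy, i, hi, hmem⟩
    obtain ⟨a, ha, hpre, hne⟩ := (pv_prefix_iff ms m).mpr ⟨i, hi, hmem⟩
    exact ⟨a, ha, ⟨hpre, hne⟩, hpy⟩

lemma pv_loop (pl : List String) (ms : List String) (kept : PySem.Set String)
    (h : ∀ s : String, s ∈ kept ↔ s ∈ ms) :
    pl.foldl
      (fun modules module =>
        if modules.any (fun added_module =>
            PySem.Str.startswith module added_module && module != added_module
              && !(PySem.Str.endswith module ".py"))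
        then modules
        else modules ++ [module]) ms
    = (pl.foldl
        (fun (st : List String × PySem.Set String) module =>
          if PySem.Str.endswith module ".py"
              || !((PySem.List.pyRange 0 (PySem.Str.len module) 1).any
                    (fun i => PySem.Set.contains st.2 (PySem.Str.slice module none (some i))))
          then (st.1 ++ [module], PySem.Set.add st.2 module)
          else st) (ms, kept)).1 := by
  induction pl generalizing ms kept with
  | nil => rfl
  | cons m pl ih =>
    simp only [List.foldl_cons]
    rw [pv_cond ms kept m h]
    cases hb : (PySem.Str.endswith m ".py"
        || !((PySem.List.pyRange 0 (PySem.Str.len m) 1).any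
              (fun i => PySem.Set.contains kept (PySem.Str.slice m none (some i))))) with
    | true =>
      exact ih (ms ++ [m]) (PySem.Set.add kept m)
        (fun s => by simp [PySem.Set.mem_add, List.mem_append, h s])
    | false =>
      exact ih ms kept h

-- ===== VERDICT (by name: the statement is the Claim_ definition above) =====
theorem cleanse_packages_py_spec : Claim_equal_cleanse_packages_py := by
  intro package_list _hdom
  unfold Spec_cleanse_packages_py cleanse_packages_py cleanse_packages_py_alt
  exact pv_loop package_list [] PySem.Set.empty (fun s => by simp [PySem.Set.empty])
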